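-- pv_equiv track=rewrite | github.com/succdedf/real-time-PLKG-tool | oai_bs.py | Cascade_Cal
-- ===== SOURCE A (Python) =====
-- def Cascade_Cal(K, len):
--     result = 0
--     one = 1
--     i = 0
--     while i < len:
--         j = 0
--         bit = 0
--         while j < 3:
--             bit = bit ^ (K & 1)
--             K = K >> 1
--             j += 1
--         if bit == 1:
--             result |= one
--         one = one << 1
--         i += 3
--     return result
-- ===== SOURCE B (Python) =====
-- _P = [0, 1, 1, 0, 1, 0, 0, 1]  # popcount parity of each 3-bit value
--
-- def Cascade_Cal(K, len):
--     result = 0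
--     one = 1
--     for _ in range((len + 2) // 3):
--         if _P[K & 7]:
--             result |= one
--         K >>= 3
--         one <<= 1
--     return result
-- ===== Notes on version B (the rewrite author's own statement) =====
-- stated objective: simpler
-- what changed: Replaces A's inner 3-step XOR loop with a precomputed 8-entry parity lookup table indexed by the masked low 3 bits (K & 7), shifting K by 3 per group.
import Mathlib
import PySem

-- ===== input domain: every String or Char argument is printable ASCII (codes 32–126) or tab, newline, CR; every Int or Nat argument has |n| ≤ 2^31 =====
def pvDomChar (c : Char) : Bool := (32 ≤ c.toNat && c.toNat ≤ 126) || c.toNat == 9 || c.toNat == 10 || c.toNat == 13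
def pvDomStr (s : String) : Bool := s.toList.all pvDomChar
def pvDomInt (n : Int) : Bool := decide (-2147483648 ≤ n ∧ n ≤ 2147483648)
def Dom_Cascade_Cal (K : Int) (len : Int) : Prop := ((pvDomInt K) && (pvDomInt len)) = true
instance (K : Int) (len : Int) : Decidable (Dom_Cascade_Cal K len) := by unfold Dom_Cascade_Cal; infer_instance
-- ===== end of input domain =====

-- B replaces A's inner 3-step XOR loop with an 8-entry parity lookup table on K & 7 (objective: simpler).

-- ===== PORT A =====
-- inner 'while j < 3' loop: state (K, bit), counter j
def Cascade_Cal_inner (K : Int) (bit : Int) (j : Int) : Int × Int :=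
  if j < 3 then
    Cascade_Cal_inner (K >>> (1 : Nat)) (PySem.Int.bxor bit (PySem.Int.band K 1)) (j + 1)
  else (K, bit)
termination_by (3 - j).toNat
decreasing_by omega

-- outer 'while i < len' loop: state (K, result, one), counter i
def Cascade_Cal_loop (K result one i len : Int) : Int :=
  if i < len then
    let p := Cascade_Cal_inner K 0 0
    let result' := if p.2 = 1 then PySem.Int.bor result one else result
    Cascade_Cal_loop p.1 result' (one <<< (1 : Nat)) (i + 3) len
  else result
termination_by (len - i).toNat
decreasing_by omega

def Cascade_Cal (K : Int) (len : Int) : Int :=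
  Cascade_Cal_loop K 0 1 0 len

-- ===== PORT B =====
def pvParityTable : List Int := [0, 1, 1, 0, 1, 0, 0, 1]

-- 'for _ in range(n)' loop; the index K & 7 is always in 0..7, so pyGet? is some and getD 0 is never taken
def Cascade_Cal_alt_loop (K result one : Int) : Nat → Int
  | 0 => result
  | n + 1 =>
    let result' :=
      if (PySem.List.pyGet? pvParityTable (PySem.Int.band K 7)).getD 0 ≠ 0 then
        PySem.Int.bor result one
      else result
    Cascade_Cal_alt_loop (K >>> (3 : Nat)) result' (one <<< (1 : Nat)) n

def Cascade_Cal_alt (K : Int) (len : Int) : Int :=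
  Cascade_Cal_alt_loop K 0 1 (PySem.Int.floordiv (len + 2) 3).toNat

-- ===== PRECONDITION & SPEC =====
def Spec_Cascade_Cal (K : Int) (len : Int) (out : Int) : Prop := out = Cascade_Cal_alt K len
instance (K : Int) (len : Int) (out : Int) : Decidable (Spec_Cascade_Cal K len out) := by unfold Spec_Cascade_Cal; infer_instance

-- ===== CLAIM (what is proved, stated in full; the proofs are below) =====
def Claim_equal_Cascade_Cal : Prop := ∀ (K : Int) (len : Int), Dom_Cascade_Cal K len → Spec_Cascade_Cal K len (Cascade_Cal K len)

-- ===== LEMMAS AND PROOFS =====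

-- K & 7 is K mod 8 (Python/floor semantics; here emod since 8 > 0)
lemma band_seven (K : Int) : PySem.Int.band K 7 = K % 8 := by
  have e7 : (7 : Int).toNat = 7 := rfl
  unfold PySem.Int.band
  split_ifs with h1 h2 h2
  · rw [e7]
    have := Nat.and_two_pow_sub_one_eq_mod K.toNat 3
    norm_num at this
    omega
  · omega
  · rw [e7, Nat.and_comm]
    have h := Nat.and_two_pow_sub_one_eq_mod (-K - 1).toNat 3
    rw [show (2 : ℕ) ^ 3 - 1 = 7 by norm_num] at h
    rw [show (2 : ℕ) ^ 3 = 8 by norm_num] at h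
    omega
  · omega

-- the three-fold XOR of the low bits equals the table entry at K % 8
lemma bit_table (K : Int) :
    PySem.Int.bxor (PySem.Int.bxor (PySem.Int.bxor 0 (K % 2)) (K / 2 % 2)) (K / 4 % 2)
      = (PySem.List.pyGet? pvParityTable (K % 8)).getD 0 := by
  have h2 : K % 2 = K % 8 % 2 := by omega
  have h4 : K / 2 % 2 = K % 8 / 2 % 2 := by omega
  have h8 : K / 4 % 2 = K % 8 / 4 % 2 := by omega
  rw [h2, h4, h8]
  have h : K % 8 = 0 ∨ K % 8 = 1 ∨ K % 8 = 2 ∨ K % 8 = 3 ∨ K % 8 = 4 ∨ K % 8 = 5 ∨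
      K % 8 = 6 ∨ K % 8 = 7 := by omega
  rcases h with h|h|h|h|h|h|h|h <;> rw [h] <;> decide

-- the inner loop returns K shifted by 3 and the table value for K's low 3 bits
lemma inner_eq (K : Int) :
    Cascade_Cal_inner K 0 0
      = (K >>> (3 : Nat), (PySem.List.pyGet? pvParityTable (PySem.Int.band K 7)).getD 0) := by
  have d1 : K >>> (1 : Nat) = K / 2 := by
    rw [Int.shiftRight_eq_div_pow]; norm_num
  have d2 : K >>> (1 : Nat) >>> (1 : Nat) = K / 4 := by
    rw [d1, Int.shiftRight_eq_div_pow]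
    norm_num
    omega
  have d3 : K >>> (1 : Nat) >>> (1 : Nat) >>> (1 : Nat) = K >>> (3 : Nat) := by
    rw [show (3 : Nat) = 1 + 1 + 1 from rfl, Int.shiftRight_add, Int.shiftRight_add]
  rw [Cascade_Cal_inner, Cascade_Cal_inner, Cascade_Cal_inner, Cascade_Cal_inner]
  norm_num
  rw [d3]
  refine ⟨Eq.refl _, ?_⟩
  rw [d2, d1, PySem.Int.band_one, PySem.Int.band_one, PySem.Int.band_one,
      PySem.Int.mod_eq_emod_of_pos (by norm_num),
      PySem.Int.mod_eq_emod_of_pos (by norm_num),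
      PySem.Int.mod_eq_emod_of_pos (by norm_num), band_seven]
  exact bit_table K

-- table entries are 0 or 1
lemma table_zero_one (K : Int) :
    (PySem.List.pyGet? pvParityTable (PySem.Int.band K 7)).getD 0 = 0 ∨
    (PySem.List.pyGet? pvParityTable (PySem.Int.band K 7)).getD 0 = 1 := by
  rw [band_seven]
  have h : K % 8 = 0 ∨ K % 8 = 1 ∨ K % 8 = 2 ∨ K % 8 = 3 ∨ K % 8 = 4 ∨ K % 8 = 5 ∨
      K % 8 = 6 ∨ K % 8 = 7 := by omega
  rcases h with h|h|h|h|h|h|h|h <;> rw [h] <;> decide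

-- one unfolding of A's outer loop in the running case
lemma loop_succ (K result one i len : Int) (hlt : i < len) :
    Cascade_Cal_loop K result one i len =
      Cascade_Cal_loop (Cascade_Cal_inner K 0 0).1
        (if (Cascade_Cal_inner K 0 0).2 = 1 then PySem.Int.bor result one else result)
        (one <<< (1 : Nat)) (i + 3) len := by
  rw [Cascade_Cal_loop, if_pos hlt]

-- the two loops agree when B's iteration count is the number of groups A still has to do
lemma loops_eq : ∀ (n : Nat) (K result one i len : Int),
    (PySem.Int.floordiv (len - i + 2) 3).toNat = n →
    Cascade_Cal_loop K result one i len = Cascade_Cal_alt_loop K result one n := by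
  intro n
  induction n with
  | zero =>
    intro K result one i len hn
    rw [PySem.Int.floordiv_eq_ediv_of_pos (by norm_num)] at hn
    rw [Cascade_Cal_loop]
    have : ¬ i < len := by omega
    simp [this, Cascade_Cal_alt_loop]
  | succ n ih =>
    intro K result one i len hn
    rw [PySem.Int.floordiv_eq_ediv_of_pos (by norm_num)] at hn
    have hlt : i < len := by omega
    have hrec : (PySem.Int.floordiv (len - (i + 3) + 2) 3).toNat = n := by
      rw [PySem.Int.floordiv_eq_ediv_of_pos (by norm_num)]
      omega
    rw [loop_succ K result one i len hlt, inner_eq, ih _ _ _ _ _ hrec,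
      Cascade_Cal_alt_loop]
    rcases table_zero_one K with h | h <;> simp [h]

-- ===== VERDICT (by name: the statement is the Claim_ definition above) =====
theorem Cascade_Cal_spec : Claim_equal_Cascade_Cal := by
  intro K len _
  unfold Spec_Cascade_Cal Cascade_Cal Cascade_Cal_alt
  exact loops_eq _ K 0 1 0 len (by norm_num)
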